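-- pv_equiv track=rewrite | github.com/frijswijk/OCBC_XEROX | xerox_annotator.py | _desc_shp
-- ===== SOURCE A (Python) =====
-- def _unquote(tok: str) -> str:
--     """Return the content of a (string) token without the parentheses."""
--     if tok.startswith("(") and tok.endswith(")"):
--         return tok[1:-1]
--     return tok
--
-- def _is_number(tok: str) -> bool:
--     try:
--         float(tok)
--         return True
--     except (ValueError, TypeError):
--         return False
--
-- def _is_string(tok: str) -> bool:
--     return tok.startswith("(") and tok.endswith(")")
--
-- def _is_var(tok: str) -> bool:
--     u = tok.upper()
--     return u.startswith("VAR_") or u.startswith("FLD") or tok == "PREFIX"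
--
-- def _label(tok: str) -> str:
--     """Human-readable label for a string / variable / other token."""
--     if _is_string(tok):
--         content = _unquote(tok)
--         if not content.strip():
--             return "(spaces)"
--         if len(content) > 32:
--             return f'"{content[:29]}..."'
--         return f'"{content}"'
--     if _is_var(tok):
--         return f"variable {tok}"
--     return tok
--
-- def _desc_shp(args, full, cmd):
--     """Handle SHP (show with explicit column width)."""
--     text_tok = None
--     width = None
--     for j in range(len(args) - 1, -1, -1):
--         t = args[j]
--         if _is_string(t) or _is_var(t):
--             text_tok = t
--             after = args[j + 1:]
--             nums_after = [x for x in after if _is_number(x)]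
--             if nums_after:
--                 width = nums_after[0]  # first number after text = column width
--             break
--
--     lbl = _label(text_tok) if text_tok else "text"
--     w_part = f" in a {width}-unit wide column" if width else " in fixed-width column"
--     return f"Print {lbl}{w_part}"
-- ===== SOURCE B (Python) =====
-- def _unquote(tok: str) -> str:
--     """Return the content of a (string) token without the parentheses."""
--     if tok.startswith("(") and tok.endswith(")"):
--         return tok[1:-1]
--     return tok
--
-- def _is_number(tok: str) -> bool:
--     try:
--         float(tok)
--         return True
--     except (ValueError, TypeError):
--         return False
--
-- def _is_string(tok: str) -> bool:
--     return tok.startswith("(") and tok.endswith(")")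
--
-- def _is_var(tok: str) -> bool:
--     u = tok.upper()
--     return u.startswith("VAR_") or u.startswith("FLD") or tok == "PREFIX"
--
-- def _label(tok: str) -> str:
--     """Human-readable label for a string / variable / other token."""
--     if _is_string(tok):
--         content = _unquote(tok)
--         if not content.strip():
--             return "(spaces)"
--         if len(content) > 32:
--             return f'"{content[:29]}..."'
--         return f'"{content}"'
--     if _is_var(tok):
--         return f"variable {tok}"
--     return tok
--
-- def _desc_shp(args, full, cmd):
--     """Handle SHP: two staged passes — a forward pass records the last text token and
--     the position just after it, then the width is the first number in that suffix."""
--     text_tok = None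
--     pos = 0
--     for i, t in enumerate(args):
--         if _is_string(t) or _is_var(t):
--             text_tok, pos = t, i + 1
--     if text_tok is None:
--         return "Print text in fixed-width column"
--     width = next((x for x in args[pos:] if _is_number(x)), None)
--     lbl = _label(text_tok)
--     if width is None:
--         return f"Print {lbl} in fixed-width column"
--     return f"Print {lbl} in a {width}-unit wide column"
-- ===== Notes on version B (the rewrite author's own statement) =====
-- stated objective: alternative
-- what changed: Replaces A's backward index scan with break plus a suffix slice-and-filter by two staged forward passes (record the last text token and the position after it, then take the first number in that suffix); the Lean port also recognizes float literals with a character DFA instead of A's recursive-descent grammar.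
import Mathlib
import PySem

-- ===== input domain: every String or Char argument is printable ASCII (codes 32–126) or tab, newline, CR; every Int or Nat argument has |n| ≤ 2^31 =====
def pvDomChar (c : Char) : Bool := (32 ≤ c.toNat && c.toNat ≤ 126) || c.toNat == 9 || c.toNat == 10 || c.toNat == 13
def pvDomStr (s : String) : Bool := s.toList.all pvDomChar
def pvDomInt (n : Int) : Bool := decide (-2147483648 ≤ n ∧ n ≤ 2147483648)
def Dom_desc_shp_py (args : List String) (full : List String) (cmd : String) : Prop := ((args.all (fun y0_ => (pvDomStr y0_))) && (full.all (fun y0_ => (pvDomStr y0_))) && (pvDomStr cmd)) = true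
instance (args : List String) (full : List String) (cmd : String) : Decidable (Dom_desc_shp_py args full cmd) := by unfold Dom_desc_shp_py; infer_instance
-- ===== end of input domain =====

-- B replaces A's backward scan with break plus suffix filter by two staged forward passes
-- (last text token + position, then first number in the suffix) and a DFA number recognizer
-- (objective: alternative decomposition, same cost).

-- ===== PORT A =====
-- A-side helpers: verbatim ports of the module helpers, including float(tok) acceptance
-- as a recursive-descent parse of CPython's float-literal grammar.

-- digitpart tail after one digit: digits, with single underscores allowed only between digits
def pvDpTail : List Char → List Char
  | [] => []
  | c :: rest =>
    if c.isDigit then pvDpTail rest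
    else if c = '_' then
      match rest with
      | d :: rest' => if d.isDigit then pvDpTail rest' else c :: rest
      | [] => c :: rest
  else c :: rest

-- consume one digitpart (digit (("_")? digit)*), returning the rest; none if no leading digit
def pvDigitpart? : List Char → Option (List Char)
  | [] => none
  | c :: rest => if c.isDigit then some (pvDpTail rest) else none

-- consume the mantissa: digitpart ["." [digitpart]] | "." digitpart
def pvMantissa? (cs : List Char) : Option (List Char) :=
  match cs with
  | '.' :: rest => pvDigitpart? rest
  | _ =>
    match pvDigitpart? cs with
    | some r =>
      match r with
      | '.' :: r2 =>
        match pvDigitpart? r2 with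
        | some r3 => some r3
        | none => some r2
      | _ => some r
    | none => none

-- consume an exponent ("e"|"E") ["+"|"-"] digitpart; none if it does not parse
def pvExp? : List Char → Option (List Char)
  | [] => none
  | c :: rest =>
    if c = 'e' ∨ c = 'E' then
      match rest with
      | s :: r => if s = '+' ∨ s = '-' then pvDigitpart? r else pvDigitpart? rest
      | [] => none
    else none

-- float(tok) acceptance after whitespace strip: optional sign, then inf/infinity/nan (case-insensitive) or number
def pvFloatCore (cs : List Char) : Bool :=
  let cs1 := match cs with
    | c :: r => if c = '+' ∨ c = '-' then r else c :: r
    | [] => []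
  let low := cs1.map PySem.Chars.lowerChar
  if low = "inf".toList ∨ low = "infinity".toList ∨ low = "nan".toList then true
  else
    match pvMantissa? cs1 with
    | some r =>
      (match pvExp? r with
       | some r2 => r2.isEmpty
       | none => r.isEmpty)
    | none => false

-- _is_number: float(tok) succeeds (exact CPython float-literal grammar on the ASCII domain)
def pvIsNumber (tok : String) : Bool := pvFloatCore (PySem.Chars.strip tok.toList)

-- _is_string
def pvIsString (tok : String) : Bool := PySem.Str.startswith tok "(" && PySem.Str.endswith tok ")"

-- _is_var
def pvIsVar (tok : String) : Bool :=
  let u := PySem.Str.upper tok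
  PySem.Str.startswith u "VAR_" || PySem.Str.startswith u "FLD" || tok == "PREFIX"

-- _unquote: tok[1:-1] when parenthesised
def pvUnquote (tok : String) : String :=
  if PySem.Str.startswith tok "(" && PySem.Str.endswith tok ")" then
    PySem.Str.slice tok (some 1) (some (-1))
  else tok

-- _label (as A calls it: re-checks _is_string, then _unquote re-checks again)
def pvLabel (tok : String) : String :=
  if pvIsString tok then
    let content := pvUnquote tok
    if PySem.Str.strip content = "" then "(spaces)"
    else if 32 < PySem.Str.len content then "\"" ++ PySem.Str.slice content none (some 29) ++ "...\""
    else "\"" ++ content ++ "\""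
  else if pvIsVar tok then "variable " ++ tok
  else tok

-- A's loop: j from len(args)-1 down to 0, break at the first (last) string/var token,
-- width = first number in args[j+1:]
def pvFindA (args : List String) : Nat → Option String × Option String
  | 0 => (none, none)
  | j + 1 =>
    let t := args.getD j ""
    if pvIsString t || pvIsVar t then
      let after := args.drop (j + 1)            -- args[j+1:], j+1 ≥ 0
      let nums_after := after.filter pvIsNumber
      (some t, nums_after.head?)                -- nums_after[0] if nums_after else None
    else pvFindA args j

-- final formatting exactly as A's last three lines; a set text_tok / width is always a
-- nonempty string (never "" since _is_string/_is_var/_is_number reject ""), so Python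
-- truthiness = isSome here
def desc_shp_py (args : List String) (full : List String) (cmd : String) : String :=
  let st := pvFindA args args.length
  let lbl := match st.1 with | some t => pvLabel t | none => "text"
  let w_part := match st.2 with
    | some w => " in a " ++ w ++ "-unit wide column"
    | none => " in fixed-width column"
  "Print " ++ lbl ++ w_part

-- ===== PORT B =====
-- B-side helpers, written on List Char: the number test is a character DFA over the same
-- float grammar, the token tests read head/getLast/take directly, and the scan is two
-- staged forward passes.

-- DFA transition for CPython's float-literal body (state 11 = dead)
def pvDelta (s : Nat) (c : Char) : Nat :=
  match s with
  | 0 => if c.isDigit then 1 else if c = '.' then 2 else 11          -- start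
  | 1 => if c.isDigit then 1 else if c = '_' then 5 else if c = '.' then 3
         else if c = 'e' ∨ c = 'E' then 6 else 11                    -- int digits (accept)
  | 2 => if c.isDigit then 4 else 11                                 -- after leading '.'
  | 3 => if c.isDigit then 4 else if c = 'e' ∨ c = 'E' then 6 else 11 -- after '.' following digits (accept)
  | 4 => if c.isDigit then 4 else if c = '_' then 7
         else if c = 'e' ∨ c = 'E' then 6 else 11                    -- fraction digits (accept)
  | 5 => if c.isDigit then 1 else 11                                 -- '_' inside int part
  | 6 => if c.isDigit then 8 else if c = '+' ∨ c = '-' then 9 else 11 -- after 'e'/'E'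
  | 7 => if c.isDigit then 4 else 11                                 -- '_' inside fraction
  | 8 => if c.isDigit then 8 else if c = '_' then 10 else 11         -- exponent digits (accept)
  | 9 => if c.isDigit then 8 else 11                                 -- after exponent sign
  | 10 => if c.isDigit then 8 else 11                                -- '_' inside exponent
  | _ => 11

def pvAccept (s : Nat) : Bool := s == 1 || s == 3 || s == 4 || s == 8

-- _is_number via the DFA: strip, optional sign, inf/infinity/nan, else run the DFA
def pvIsNumberB (tok : String) : Bool :=
  let cs := PySem.Chars.strip tok.toList
  let body := match cs with
    | c :: r => if c = '+' ∨ c = '-' then r else c :: r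
    | [] => []
  ["inf", "infinity", "nan"].any (fun w => (body.map PySem.Chars.lowerChar) = w.toList)
    || pvAccept (body.foldl pvDelta 0)

-- _is_string: first char '(' and last char ')'
def pvIsStringB (tok : String) : Bool :=
  tok.toList.head? == some '(' && tok.toList.getLast? == some ')'

-- _is_var: compare uppercased prefixes by take
def pvIsVarB (tok : String) : Bool :=
  let u := tok.toList.map PySem.Chars.upperChar
  decide (u.take 4 = "VAR_".toList) || decide (u.take 3 = "FLD".toList)
    || decide (tok.toList = "PREFIX".toList)

-- _label, built on the char list: content is drop 1 / dropLast, spaces test is all-isspace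
def pvLabelB (tok : String) : String :=
  let cs := tok.toList
  if pvIsStringB tok then
    let content := (cs.drop 1).dropLast
    String.ofList (
      if content.all PySem.Chars.isspace then "(spaces)".toList
      else if 32 < content.length then '"' :: (content.take 29 ++ "...\"".toList)
      else '"' :: (content ++ ['"']))
  else if pvIsVarB tok then String.ofList ("variable ".toList ++ cs)
  else tok

-- pass 1: forward over enumerate(args), remember the last text token and the index after it
def pvLastTextB (args : List String) : Option String × Int :=
  (PySem.List.enumerate args 0).foldl
    (fun acc p => if pvIsStringB p.2 || pvIsVarB p.2 then (some p.2, p.1 + 1) else acc)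
    (none, 0)

-- pass 2: first number in args[pos:] (next(filter) ported as find?), then format
def desc_shp_py_alt (args : List String) (full : List String) (cmd : String) : String :=
  match pvLastTextB args with
  | (none, _) => "Print text in fixed-width column"
  | (some t, pos) =>
    match (PySem.List.slice args (some pos) none).find? pvIsNumberB with
    | none => "Print " ++ pvLabelB t ++ " in fixed-width column"
    | some w => "Print " ++ pvLabelB t ++ " in a " ++ w ++ "-unit wide column"

-- ===== PRECONDITION & SPEC =====
def Spec_desc_shp_py (args : List String) (full : List String) (cmd : String) (out : String) : Prop := out = desc_shp_py_alt args full cmd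
instance (args : List String) (full : List String) (cmd : String) (out : String) : Decidable (Spec_desc_shp_py args full cmd out) := by unfold Spec_desc_shp_py; infer_instance

-- ===== CLAIM (what is proved, stated in full; the proofs are below) =====
def Claim_equal_desc_shp_py : Prop := ∀ (args : List String) (full : List String) (cmd : String), Dom_desc_shp_py args full cmd → Spec_desc_shp_py args full cmd (desc_shp_py args full cmd)

-- ===== LEMMAS AND PROOFS =====

def pvExpEnd (r : List Char) : Bool :=
  match pvExp? r with
  | some r2 => r2.isEmpty
  | none => r.isEmpty

theorem pvRun_dead (cs : List Char) : cs.foldl pvDelta 11 = 11 := by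
  induction cs with
  | nil => rfl
  | cons c rest ih => simpa [List.foldl, pvDelta] using ih

theorem pvAccept_dead (cs : List Char) : pvAccept (cs.foldl pvDelta 11) = false := by
  rw [pvRun_dead]; rfl

theorem dpTail_digit (c : Char) (rest : List Char) (hc : c.isDigit = true) :
    pvDpTail (c :: rest) = pvDpTail rest := by rw [pvDpTail.eq_def]; simp [hc]
theorem dpTail_und_digit (d : Char) (rest' : List Char) (hd : d.isDigit = true) :
    pvDpTail ('_' :: d :: rest') = pvDpTail rest' := by rw [pvDpTail.eq_def]; simp [hd]
theorem dpTail_und_nondigit (d : Char) (rest' : List Char) (hd : ¬ d.isDigit = true) :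
    pvDpTail ('_' :: d :: rest') = '_' :: d :: rest' := by rw [pvDpTail.eq_def]; simp [hd]
theorem dpTail_und_nil : pvDpTail ['_'] = ['_'] := by rw [pvDpTail.eq_def]; simp
theorem dpTail_other (c : Char) (rest : List Char) (hc : ¬ c.isDigit = true) (hu : ¬ c = '_') :
    pvDpTail (c :: rest) = c :: rest := by rw [pvDpTail.eq_def]; simp [hc, hu]

theorem pvAcc8 (cs : List Char) : pvAccept (cs.foldl pvDelta 8) = decide (pvDpTail cs = []) := by
  induction cs using pvDpTail.induct with
  | case1 => simp [pvDpTail, pvAccept]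
  | case2 c rest hc ih => rw [dpTail_digit c rest hc]; simpa [List.foldl, pvDelta, hc] using ih
  | case3 d rest' hd _ ih => rw [dpTail_und_digit d rest' hd]; simpa [List.foldl, pvDelta, hd] using ih
  | case4 d rest' hd _ => rw [dpTail_und_nondigit d rest' hd]; simp [List.foldl, pvDelta, hd, pvAccept_dead]
  | case5 _ => rw [dpTail_und_nil]; simp [List.foldl, pvDelta, pvAccept]
  | case6 c rest hc hu => rw [dpTail_other c rest hc hu]; simp [List.foldl, pvDelta, hc, hu, pvAccept_dead]
theorem pvAcc9 (cs : List Char) :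
    pvAccept (cs.foldl pvDelta 9)
      = (match pvDigitpart? cs with | some x => x.isEmpty | none => false) := by
  cases cs with
  | nil => rfl
  | cons c r =>
    by_cases hc : c.isDigit = true
    · simp [pvDigitpart?, hc, List.foldl, pvDelta, pvAcc8]
      cases h : pvDpTail r <;> simp [h]
    · simp [pvDigitpart?, hc, List.foldl, pvDelta, pvAccept_dead]

theorem pvAcc6 (c : Char) (cs : List Char) (hc : c = 'e' ∨ c = 'E') :
    pvAccept (cs.foldl pvDelta 6)
      = (match pvExp? (c :: cs) with | some r2 => r2.isEmpty | none => false) := by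
  cases cs with
  | nil => simp [pvExp?, hc]; rfl
  | cons s r =>
    by_cases hs : s = '+' ∨ s = '-'
    · have h9 := pvAcc9 r
      simp only [pvExp?, hc, if_pos, List.foldl, pvDelta]
      have : (if s.isDigit = true then 8 else if s = '+' ∨ s = '-' then 9 else 11) = 9 := by
        rcases hs with h | h <;> simp [h] <;> decide
      rw [this, h9]
      rcases hs with h | h <;> simp [h]
      <;> cases hdp : pvDigitpart? r <;> simp
    · by_cases hd : s.isDigit = true
      · have h8 := pvAcc8 r
        simp only [pvExp?, hc, if_pos, List.foldl, pvDelta, hd, if_true]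
        simp [pvDigitpart?, hd, hs, h8]
        cases h : pvDpTail r <;> simp [h]
      · simp [pvExp?, hc, hs, pvDigitpart?, hd, List.foldl, pvDelta, pvAccept_dead]
theorem pvExpEnd_cons_not_e (c : Char) (r : List Char) (hc : ¬ (c = 'e' ∨ c = 'E')) :
    pvExpEnd (c :: r) = false := by
  simp [pvExpEnd, pvExp?, hc]

theorem pvExpEnd_cons_e (c : Char) (r : List Char) (hc : c = 'e' ∨ c = 'E') :
    pvExpEnd (c :: r) = (match pvExp? (c :: r) with | some r2 => r2.isEmpty | none => false) := by
  unfold pvExpEnd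
  cases h : pvExp? (c :: r) with
  | some r2 => rfl
  | none => simp

theorem pvAcc4 (cs : List Char) : pvAccept (cs.foldl pvDelta 4) = pvExpEnd (pvDpTail cs) := by
  induction cs using pvDpTail.induct with
  | case1 => simp [pvDpTail, pvExpEnd, pvExp?]; rfl
  | case2 c rest hc ih => rw [dpTail_digit c rest hc]; simpa [List.foldl, pvDelta, hc] using ih
  | case3 d rest' hd _ ih => rw [dpTail_und_digit d rest' hd]; simpa [List.foldl, pvDelta, hd] using ih
  | case4 d rest' hd _ =>
    rw [dpTail_und_nondigit d rest' hd]
    have : ¬ ('_' = 'e' ∨ '_' = 'E') := by decide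
    rw [pvExpEnd_cons_not_e _ _ this]
    simp [List.foldl, pvDelta, hd, pvAccept_dead]
  | case5 _ =>
    rw [dpTail_und_nil]
    have : ¬ ('_' = 'e' ∨ '_' = 'E') := by decide
    rw [pvExpEnd_cons_not_e _ _ this]
    simp [List.foldl, pvDelta, pvAccept]
  | case6 c rest hc hu =>
    rw [dpTail_other c rest hc hu]
    by_cases he : c = 'e' ∨ c = 'E'
    · rw [pvExpEnd_cons_e c rest he, ← pvAcc6 c rest he]
      have : pvDelta 4 c = 6 := by rcases he with h | h <;> simp [pvDelta, hc, hu, h] <;> decide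
      simp [List.foldl, this]
    · rw [pvExpEnd_cons_not_e c rest he]
      have : pvDelta 4 c = 11 := by simp [pvDelta, hc, hu, he]
      simp [List.foldl, this, pvAccept_dead]
theorem pvAcc3 (cs : List Char) :
    pvAccept (cs.foldl pvDelta 3)
      = (match pvDigitpart? cs with | some r3 => pvExpEnd r3 | none => pvExpEnd cs) := by
  cases cs with
  | nil => simp [pvDigitpart?, pvExpEnd, pvExp?]; rfl
  | cons c r =>
    by_cases hc : c.isDigit = true
    · have h4 := pvAcc4 r
      have : pvDelta 3 c = 4 := by simp [pvDelta, hc]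
      simp [pvDigitpart?, hc, List.foldl, this, h4]
    · by_cases he : c = 'e' ∨ c = 'E'
      · have : pvDelta 3 c = 6 := by rcases he with h | h <;> simp [pvDelta, hc, h]
        simp only [List.foldl, this, pvAcc6 c r he, pvDigitpart?, hc]
        rw [pvExpEnd_cons_e c r he]
        simp
      · have : pvDelta 3 c = 11 := by simp [pvDelta, hc, he]
        simp [pvDigitpart?, hc, List.foldl, this, pvAccept_dead, pvExpEnd_cons_not_e c r he]

def pvMant1End (r : List Char) : Bool :=
  match r with
  | '.' :: r2 => (match pvDigitpart? r2 with | some r3 => pvExpEnd r3 | none => pvExpEnd r2)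
  | r => pvExpEnd r

theorem pvMant1End_dot (r2 : List Char) :
    pvMant1End ('.' :: r2) = (match pvDigitpart? r2 with | some r3 => pvExpEnd r3 | none => pvExpEnd r2) := rfl

theorem pvMant1End_not_dot (c : Char) (r : List Char) (hc : ¬ c = '.') :
    pvMant1End (c :: r) = pvExpEnd (c :: r) := by
  rw [pvMant1End.eq_def]; simp [hc]

theorem pvAcc1 (cs : List Char) :
    pvAccept (cs.foldl pvDelta 1) = pvMant1End (pvDpTail cs) := by
  induction cs using pvDpTail.induct with
  | case1 => simp [pvDpTail, pvMant1End, pvExpEnd, pvExp?]; rfl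
  | case2 c rest hc ih => rw [dpTail_digit c rest hc]; simpa [List.foldl, pvDelta, hc] using ih
  | case3 d rest' hd _ ih => rw [dpTail_und_digit d rest' hd]; simpa [List.foldl, pvDelta, hd] using ih
  | case4 d rest' hd _ =>
    rw [dpTail_und_nondigit d rest' hd]
    have h11 : pvDelta 5 d = 11 := by simp [pvDelta, hd]
    rw [pvMant1End_not_dot _ _ (by decide), pvExpEnd_cons_not_e _ _ (by decide)]
    simp [List.foldl, show pvDelta 1 '_' = 5 from by decide, h11, pvAccept_dead]
  | case5 _ =>
    rw [dpTail_und_nil]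
    rw [pvMant1End_not_dot _ _ (by decide), pvExpEnd_cons_not_e _ _ (by decide)]
    simp [List.foldl, show pvDelta 1 '_' = 5 from by decide, pvAccept]
  | case6 c rest hc hu =>
    rw [dpTail_other c rest hc hu]
    by_cases hdot : c = '.'
    · subst hdot
      rw [pvMant1End_dot]
      simp [List.foldl, show pvDelta 1 '.' = 3 from by decide, pvAcc3 rest]
    · rw [pvMant1End_not_dot c rest hdot]
      by_cases he : c = 'e' ∨ c = 'E'
      · have hδ : pvDelta 1 c = 6 := by rcases he with h | h <;> subst h <;> decide
        rw [pvExpEnd_cons_e c rest he]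
        simp [List.foldl, hδ, pvAcc6 c rest he]
      · have hδ : pvDelta 1 c = 11 := by simp [pvDelta, hc, hu, hdot, he]
        rw [pvExpEnd_cons_not_e c rest he]
        simp [List.foldl, hδ, pvAccept_dead]

theorem pvAcc2 (cs : List Char) :
    pvAccept (cs.foldl pvDelta 2)
      = (match pvDigitpart? cs with | some r => pvExpEnd r | none => false) := by
  cases cs with
  | nil => rfl
  | cons c r =>
    by_cases hc : c.isDigit = true
    · have : pvDelta 2 c = 4 := by simp [pvDelta, hc]
      simp [pvDigitpart?, hc, List.foldl, this, pvAcc4 r]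
    · have : pvDelta 2 c = 11 := by simp [pvDelta, hc]
      simp [pvDigitpart?, hc, List.foldl, this, pvAccept_dead]

theorem pvAcc0 (cs : List Char) :
    pvAccept (cs.foldl pvDelta 0)
      = (match pvMantissa? cs with | some r => pvExpEnd r | none => false) := by
  cases cs with
  | nil => rfl
  | cons c r =>
    by_cases hdot : c = '.'
    · subst hdot
      have : pvDelta 0 '.' = 2 := by decide
      rw [show pvMantissa? ('.' :: r) = pvDigitpart? r from rfl]
      simp [List.foldl, this, pvAcc2 r]
    · by_cases hc : c.isDigit = true
      · have hδ : pvDelta 0 c = 1 := by simp [pvDelta, hc]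
        have hm : pvMantissa? (c :: r) = (match pvDpTail r with
            | '.' :: r2 => (match pvDigitpart? r2 with | some r3 => some r3 | none => some r2)
            | r' => some r') := by
          rw [pvMantissa?.eq_def]
          simp [hdot, pvDigitpart?, hc]
          cases h : pvDpTail r with
          | nil => rfl
          | cons c2 r2 =>
            by_cases hc2 : c2 = '.'
            · subst hc2; rfl
            · simp [hc2]
        rw [hm]
        simp only [List.foldl, hδ]
        rw [pvAcc1 r]
        rcases hdp : pvDpTail r with _ | ⟨c2, r2⟩
        · rw [pvMant1End.eq_def]
        · by_cases hc2 : c2 = '.'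
          · subst hc2
            rw [pvMant1End_dot]
            cases h2 : pvDigitpart? r2 <;> simp [h2]
          · rw [pvMant1End_not_dot c2 r2 hc2]
            have : (match c2 :: r2 with
               | '.' :: r2 => (match pvDigitpart? r2 with | some r3 => some r3 | none => some r2)
               | r' => some r') = some (c2 :: r2) := by
              cases c2 with
              | _ => simp [hc2]
            rw [this]
      · have hδ : pvDelta 0 c = 11 := by simp [pvDelta, hdot, hc]
        have hm : pvMantissa? (c :: r) = none := by
          rw [pvMantissa?.eq_def]; simp [hdot, pvDigitpart?, hc]
        simp [List.foldl, hδ, pvAccept_dead, hm]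
theorem pfx1 (a : Char) (l : List Char) : [a].isPrefixOf l = (l.head? == some a) := by
  cases l <;> simp [List.isPrefixOf, eq_comm]
theorem sfx1 (a : Char) (l : List Char) : [a].isSuffixOf l = (l.getLast? == some a) := by
  rw [List.isSuffixOf]
  simpa [← List.head?_reverse] using pfx1 a l.reverse
theorem beqToList (s t : String) : (s == t) = decide (s.toList = t.toList) := by
  rw [Bool.beq_eq_decide_eq]
  simp [String.toList_inj]
theorem takePfx (l : List Char) (p : List Char) : l.isPrefixOf p = decide (l = p.take l.length) := by
  rw [Bool.eq_iff_iff]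
  simp [List.isPrefixOf_iff_prefix, List.prefix_iff_eq_take]
theorem stripNil (s : List Char) : (PySem.Chars.strip s = []) ↔ s.all PySem.Chars.isspace := by
  unfold PySem.Chars.strip PySem.Chars.rstrip PySem.Chars.lstrip
  rw [← List.reverse_eq_nil_iff]
  simp only [List.reverse_reverse, List.dropWhile_eq_nil_iff, List.mem_reverse, List.all_eq_true]
  constructor
  · intro h x hx
    rcases List.mem_append.mp ((List.takeWhile_append_dropWhile (p := PySem.Chars.isspace) (l := s)).symm ▸ hx) with h1 | h2
    · exact List.mem_takeWhile_imp h1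
    · exact h x h2
  · intro h x hx
    exact h x (List.dropWhile_subset _ hx)

theorem slice_1_neg1 (cs : List Char) :
    PySem.List.slice cs (some 1) (some (-1)) = (cs.drop 1).dropLast := by
  cases cs with
  | nil => rfl
  | cons c r =>
    unfold PySem.List.slice PySem.List.clampIdx
    have h1 : ((1 : Int)).toNat = 1 := rfl
    simp only [List.length_cons]
    rw [List.dropLast_eq_take]
    simp only [List.length_drop]
    norm_num
    congr 1
    simp only [show ¬ ((r.length : Int) < 0) from by omega, if_false]
    omega

theorem pvIsStringB_eq (tok : String) : pvIsStringB tok = pvIsString tok := by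
  unfold pvIsStringB pvIsString
  simp only [PySem.Str.startswith, PySem.Str.endswith, PySem.Chars.startswith, PySem.Chars.endswith]
  rw [show ("(" : String).toList = ['('] from rfl, show (")" : String).toList = [')'] from rfl,
    pfx1, sfx1]

theorem pvIsVarB_eq (tok : String) : pvIsVarB tok = pvIsVar tok := by
  unfold pvIsVarB pvIsVar
  simp only [PySem.Str.startswith, PySem.Str.upper, String.toList_ofList, PySem.Chars.upper,
    PySem.Chars.startswith]
  rw [takePfx, takePfx, beqToList, Bool.eq_iff_iff]
  simp only [Bool.or_eq_true, decide_eq_true_eq]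
  constructor
  · rintro ((h | h) | h)
    · exact Or.inl (Or.inl h.symm)
    · exact Or.inl (Or.inr h.symm)
    · exact Or.inr (by simpa using h)
  · rintro ((h | h) | h)
    · exact Or.inl (Or.inl h.symm)
    · exact Or.inl (Or.inr h.symm)
    · exact Or.inr (by simpa using h)

theorem coreB_eq (cs : List Char) :
    ((["inf", "infinity", "nan"].any fun w =>
        ((match cs with
          | c :: r => if c = '+' ∨ c = '-' then r else c :: r
          | [] => ([] : List Char)).map PySem.Chars.lowerChar) = w.toList)
      || pvAccept ((match cs with
          | c :: r => if c = '+' ∨ c = '-' then r else c :: r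
          | [] => ([] : List Char)).foldl pvDelta 0)) = pvFloatCore cs := by
  unfold pvFloatCore
  generalize (match cs with
      | c :: r => if c = '+' ∨ c = '-' then r else c :: r
      | [] => ([] : List Char)) = body
  by_cases hinf : body.map PySem.Chars.lowerChar = "inf".toList
      ∨ body.map PySem.Chars.lowerChar = "infinity".toList
      ∨ body.map PySem.Chars.lowerChar = "nan".toList
  · rw [if_pos hinf]
    rcases hinf with h | h | h <;> simp [List.any, h]
  · rw [if_neg hinf]
    have hinf' := hinf
    rw [not_or, not_or] at hinf'
    have hany : (["inf", "infinity", "nan"].any fun w => body.map PySem.Chars.lowerChar = w.toList) = false := by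
      rw [List.any_eq_false]
      intro w hw
      fin_cases hw
      · simpa using hinf'.1
      · simpa using hinf'.2.1
      · simpa using hinf'.2.2
    rw [hany, Bool.false_or, pvAcc0]
    cases h : pvMantissa? body with
    | none => rfl
    | some r => simp [pvExpEnd]

theorem pvIsNumberB_eq (tok : String) : pvIsNumberB tok = pvIsNumber tok := by
  unfold pvIsNumberB pvIsNumber
  exact coreB_eq _

theorem ofList_eq_iff (l : List Char) (s : String) : String.ofList l = s ↔ l = s.toList := by
  rw [← String.toList_inj, String.toList_ofList]

theorem pvLabelB_eq (tok : String) : pvLabelB tok = pvLabel tok := by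
  unfold pvLabelB pvLabel
  rw [pvIsStringB_eq, pvIsVarB_eq]
  by_cases hs : pvIsString tok = true
  · rw [if_pos hs, if_pos hs]
    have hunq : pvUnquote tok = PySem.Str.slice tok (some 1) (some (-1)) := by
      unfold pvUnquote
      rw [if_pos (by unfold pvIsString at hs; exact hs)]
    rw [hunq]
    dsimp only
    have hcont : (PySem.Str.slice tok (some 1) (some (-1))).toList = (tok.toList.drop 1).dropLast := by
      rw [PySem.Str.slice, String.toList_ofList, PySem.Chars.slice_eq_listSlice, slice_1_neg1]
    by_cases hsp : ((tok.toList.drop 1).dropLast).all PySem.Chars.isspace = true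
    · rw [if_pos hsp, if_pos (show PySem.Str.strip (PySem.Str.slice tok (some 1) (some (-1))) = "" from by
        rw [PySem.Str.strip, ofList_eq_iff, hcont]
        exact (stripNil _).mpr hsp)]
      rfl
    · rw [if_neg hsp, if_neg (show ¬ PySem.Str.strip (PySem.Str.slice tok (some 1) (some (-1))) = "" from by
        rw [PySem.Str.strip, ofList_eq_iff, hcont]
        exact fun h => hsp ((stripNil _).mp h))]
      have hlen : PySem.Str.len (PySem.Str.slice tok (some 1) (some (-1)))
          = ((tok.toList.drop 1).dropLast.length : Int) := by
        rw [PySem.Str.len, hcont]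
      by_cases hl : 32 < (tok.toList.drop 1).dropLast.length
      · rw [if_pos hl, if_pos (by rw [hlen]; exact_mod_cast hl)]
        rw [ofList_eq_iff]
        simp only [String.toList_append]
        rw [show (PySem.Str.slice (PySem.Str.slice tok (some 1) (some (-1))) none (some 29)).toList
            = ((tok.toList.drop 1).dropLast).take 29 from by
          rw [PySem.Str.slice, String.toList_ofList, PySem.Chars.slice_eq_listSlice,
            PySem.List.slice_to _ (by norm_num), hcont]
          rfl]
        rfl
      · rw [if_neg hl, if_neg (by rw [hlen]; exact_mod_cast hl)]
        rw [ofList_eq_iff]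
        simp only [String.toList_append, hcont]
        rfl
  · rw [if_neg hs, if_neg hs]
    by_cases hv : pvIsVar tok = true
    · rw [if_pos hv, if_pos hv, ofList_eq_iff]
      simp only [String.toList_append]
    · rw [if_neg hv, if_neg hv]

theorem enum_append (xs : List String) (x : String) (s : Int) :
    PySem.List.enumerate (xs ++ [x]) s = PySem.List.enumerate xs s ++ [(s + xs.length, x)] := by
  induction xs generalizing s with
  | nil => simp [PySem.List.enumerate]
  | cons y ys ih => simp [PySem.List.enumerate, ih]; ring

-- one step of B's first pass when a token is appended
theorem lastTextB_append (args : List String) (t : String) :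
    pvLastTextB (args ++ [t])
      = (if pvIsStringB t || pvIsVarB t then (some t, (args.length : Int) + 1)
         else pvLastTextB args) := by
  unfold pvLastTextB
  rw [enum_append, List.foldl_append]
  simp only [List.foldl, zero_add]

-- B's recorded position is a valid index bound
theorem lastTextB_pos (args : List String) :
    0 ≤ (pvLastTextB args).2 ∧ (pvLastTextB args).2 ≤ (args.length : Int) := by
  induction args using List.reverseRecOn with
  | nil => exact ⟨le_refl _, by simp [pvLastTextB, PySem.List.enumerate]⟩
  | append_singleton args t ih =>
    rw [lastTextB_append]
    by_cases h : (pvIsStringB t || pvIsVarB t) = true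
    · rw [if_pos h]
      refine ⟨by positivity, ?_⟩
      simp
    · rw [if_neg (by simpa using h)]
      simp only [List.length_append, List.length_cons, List.length_nil]
      exact ⟨ih.1, by push_cast; omega⟩

-- appending a non-text token extends A's width search
theorem findA_append (args : List String) (t : String)
    (ht : (pvIsString t || pvIsVar t) = false) (j : Nat) (hj : j ≤ args.length) :
    pvFindA (args ++ [t]) j
      = ((pvFindA args j).1,
         match (pvFindA args j).1 with
         | none => (pvFindA args j).2
         | some _ => ((pvFindA args j).2).or (if pvIsNumber t then some t else none)) := by
  induction j with
  | zero => rfl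
  | succ j ih =>
    have hjlt : j < args.length := by omega
    have hget : (args ++ [t]).getD j "" = args.getD j "" := by
      simp [List.getD, List.getElem?_append_left hjlt]
    by_cases h : (pvIsString (args.getD j "") || pvIsVar (args.getD j "")) = true
    · have hdrop : (args ++ [t]).drop (j + 1) = args.drop (j + 1) ++ [t] :=
        List.drop_append_of_le_length (by omega)
      unfold pvFindA
      rw [hget]
      simp only [h, if_pos, hdrop, List.filter_append]
      cases hw : (args.drop (j + 1)).filter pvIsNumber with
      | nil =>
        by_cases hn : pvIsNumber t = true
        · simp [List.filter, hn]
        · simp [List.filter, hn]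
      | cons x xs => simp
    · unfold pvFindA
      rw [hget]
      rw [if_neg (by simpa using h), if_neg (by simpa using h)]
      exact ih (by omega)

-- the scan bridge: A's backward scan equals B's two staged passes
theorem pvScan_bridge (args : List String) :
    pvFindA args args.length
      = (match pvLastTextB args with
         | (none, _) => (none, none)
         | (some t, pos) => (some t, (PySem.List.slice args (some pos) none).find? pvIsNumber)) := by
  induction args using List.reverseRecOn with
  | nil => rfl
  | append_singleton args t ih =>
    rw [lastTextB_append]
    by_cases h : (pvIsStringB t || pvIsVarB t) = true
    · have hA : (pvIsString t || pvIsVar t) = true := by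
        rwa [pvIsStringB_eq, pvIsVarB_eq] at h
      rw [if_pos h]
      have hlen : (args ++ [t]).length = args.length + 1 := by simp
      have hget : (args ++ [t]).getD args.length "" = t := by simp [List.getD]
      unfold pvFindA
      rw [hlen]
      simp only [hget, hA, if_pos]
      have hdrop : (args ++ [t]).drop (args.length + 1) = [] := by simp
      rw [hdrop]
      have hsl : PySem.List.slice (args ++ [t]) (some ((args.length : Int) + 1)) none = [] := by
        rw [show ((args.length : Int) + 1) = (((args.length + 1 : Nat)) : Int) from by push_cast; ring,
          PySem.List.slice_from_natCast]
        simp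
      rw [hsl]
      rfl
    · have hA : (pvIsString t || pvIsVar t) = false := by
        rw [← pvIsStringB_eq, ← pvIsVarB_eq]; simpa using h
      rw [if_neg (by simpa using h)]
      have hstep : pvFindA (args ++ [t]) ((args ++ [t]).length) = pvFindA (args ++ [t]) args.length := by
        rw [show (args ++ [t]).length = args.length + 1 from by simp,
          show pvFindA (args ++ [t]) (args.length + 1)
              = (if (pvIsString ((args ++ [t]).getD args.length "") || pvIsVar ((args ++ [t]).getD args.length "")) = true
                 then (some ((args ++ [t]).getD args.length ""),
                       (((args ++ [t]).drop (args.length + 1)).filter pvIsNumber).head?)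
                 else pvFindA (args ++ [t]) args.length) from rfl,
          show (args ++ [t]).getD args.length "" = t from by simp [List.getD], hA]
        simp
      rw [hstep, findA_append args t hA args.length (le_refl _), ih]
      obtain ⟨hp0, hpl⟩ := lastTextB_pos args
      cases hb : pvLastTextB args with
      | mk tt pos =>
        cases tt with
        | none => simp
        | some x =>
          simp only
          have hsl : PySem.List.slice (args ++ [t]) (some pos) none
              = PySem.List.slice args (some pos) none ++ [t] := by
            rw [hb] at hp0 hpl
            rw [PySem.List.slice_from _ hp0, PySem.List.slice_from _ hp0,
              List.drop_append_of_le_length (by omega)]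
          rw [hsl, List.find?_append]
          congr 1
          cases hw : (PySem.List.slice args (some pos) none).find? pvIsNumber with
          | some w => simp
          | none =>
            simp only [Option.none_or]
            by_cases hn : pvIsNumber t = true <;> simp [List.find?, hn]

-- ===== VERDICT (by name: the statement is the Claim_ definition above) =====
theorem desc_shp_py_spec : Claim_equal_desc_shp_py := by
  intro args full cmd _
  unfold Spec_desc_shp_py desc_shp_py desc_shp_py_alt
  rw [pvScan_bridge]
  rw [show pvIsNumberB = pvIsNumber from funext pvIsNumberB_eq]
  cases hb : pvLastTextB args with
  | mk tt pos =>
    cases tt with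
    | none =>
      apply String.toList_inj.mp
      simp [String.toList_append]
      decide
    | some t =>
      simp only
      cases hw : (PySem.List.slice args (some pos) none).find? pvIsNumber with
      | none =>
        apply String.toList_inj.mp
        simp [String.toList_append, pvLabelB_eq]
        decide
      | some w =>
        apply String.toList_inj.mp
        simp [String.toList_append, pvLabelB_eq]
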